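-- pv_equiv track=rewrite | github.com/TahjaeJackson/CS1_Projects | RECITATION/R11_02_2021.py | three_digs_list2
-- ===== SOURCE A (Python) =====
-- def three_digs_list2(list):
--     if len(list) == 0:
--         three_dig_list = []
--         return three_dig_list
--     else:
--         final_list = three_digs_list2(list[1:])
--         if list[0] >= 100 or list[0] >= 999:
--             final_list.append(list[0])
--
--     return final_list
-- ===== SOURCE B (Python) =====
-- def three_digs_list2(list):
--     result = []
--     for x in reversed(list):
--         if x >= 100:
--             result.append(x)
--     return result
-- ===== Notes on version B (the rewrite author's own statement) =====
-- stated objective: faster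
-- what changed: Replaces A's tail recursion with slicing and post-recursion appends by a single explicit loop over the reversed list, dropping the redundant '>= 999' disjunct.
import Mathlib
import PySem

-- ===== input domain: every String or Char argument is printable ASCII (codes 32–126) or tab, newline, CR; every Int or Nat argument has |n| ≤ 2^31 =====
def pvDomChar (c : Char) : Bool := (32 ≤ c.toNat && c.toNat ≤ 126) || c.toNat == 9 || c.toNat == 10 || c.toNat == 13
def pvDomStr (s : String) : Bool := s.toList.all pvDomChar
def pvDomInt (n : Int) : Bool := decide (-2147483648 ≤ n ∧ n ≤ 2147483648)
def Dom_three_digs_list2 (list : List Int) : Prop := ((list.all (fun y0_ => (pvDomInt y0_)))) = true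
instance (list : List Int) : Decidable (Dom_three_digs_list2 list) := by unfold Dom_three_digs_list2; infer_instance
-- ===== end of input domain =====

-- B replaces A's recursion (slice + append after the recursive call, with a redundant '>= 999' disjunct) by one explicit loop over the reversed list; objective: simpler.


-- ===== PORT A =====
-- recursion on the list: recurse on the tail, then append the head if head >= 100 or head >= 999
def three_digs_list2 (list : List Int) : List Int :=
  match list with
  | [] => []
  | x :: rest =>
    let final_list := three_digs_list2 rest
    if x ≥ 100 ∨ x ≥ 999 then final_list ++ [x] else final_list

-- ===== PORT B =====
-- explicit loop over reversed(list), appending elements >= 100 to an accumulator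
def three_digs_list2_alt (list : List Int) : List Int :=
  list.reverse.foldl (fun result x => if x ≥ 100 then result ++ [x] else result) []

-- ===== PRECONDITION & SPEC =====
def Spec_three_digs_list2 (list : List Int) (out : List Int) : Prop := out = three_digs_list2_alt list
instance (list : List Int) (out : List Int) : Decidable (Spec_three_digs_list2 list out) := by unfold Spec_three_digs_list2; infer_instance

-- ===== CLAIM (what is proved, stated in full; the proofs are below) =====
def Claim_equal_three_digs_list2 : Prop := ∀ (list : List Int), Dom_three_digs_list2 list → Spec_three_digs_list2 list (three_digs_list2 list)

-- ===== LEMMAS AND PROOFS =====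
theorem three_digs_list2_eq (list : List Int) : three_digs_list2 list = three_digs_list2_alt list := by
  induction list with
  | nil => rfl
  | cons x rest ih =>
    simp only [three_digs_list2, three_digs_list2_alt, List.reverse_cons, List.foldl_append,
      List.foldl_cons, List.foldl_nil] at *
    rw [ih]
    by_cases h : x ≥ 100
    · simp [h]
    · have h9 : ¬ x ≥ 999 := by omega
      simp [h, h9]

-- ===== VERDICT (by name: the statement is the Claim_ definition above) =====
theorem three_digs_list2_spec : Claim_equal_three_digs_list2 := by
  intro list _
  exact three_digs_list2_eq list
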